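-- pv_equiv track=rewrite | github.com/mrBrain101/Yandex_Algorithm_Training_6_2024_GIT | 02_Prefix_sum_and_Two_pointers/04_Two_pointers_extra/two_pointers_extra.py | cnt_seqs
-- ===== SOURCE A (Python) =====
-- def cnt_seqs(nums, n, k):
--     nums.sort()
--     days = 0
--     cnt = 0
--     l = 0
--     r = 0
--     while r < n:
--         while r < n and nums[r] - nums[l] <= k:
--             r += 1
--         cnt = r - l
--         days = max(days, cnt)
--
--         if r == n:
--             break
--
--         while l < r and nums[l] + k < nums[r]:
--             l += 1
--
--     return max(days, n - l)
-- ===== SOURCE B (Python) =====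
-- def cnt_seqs(nums, n, k):
--     nums.sort()
--     best = 0
--     for i in range(n):
--         lo = i
--         hi = n
--         while lo < hi:
--             mid = (lo + hi) // 2
--             if nums[mid] <= nums[i] + k:
--                 lo = mid + 1
--             else:
--                 hi = mid
--         best = max(best, lo - i)
--     return best
-- ===== Notes on version B (the rewrite author's own statement) =====
-- stated objective: alternative
-- what changed: Replaces A's monotonic two-pointer sweep (nested while loops over l and r with running cnt/days state) by an independent per-index hand-written binary search: for each i the window end is found by bisecting in [i, n), and the maximum window length is tracked directly.
import Mathlib
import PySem

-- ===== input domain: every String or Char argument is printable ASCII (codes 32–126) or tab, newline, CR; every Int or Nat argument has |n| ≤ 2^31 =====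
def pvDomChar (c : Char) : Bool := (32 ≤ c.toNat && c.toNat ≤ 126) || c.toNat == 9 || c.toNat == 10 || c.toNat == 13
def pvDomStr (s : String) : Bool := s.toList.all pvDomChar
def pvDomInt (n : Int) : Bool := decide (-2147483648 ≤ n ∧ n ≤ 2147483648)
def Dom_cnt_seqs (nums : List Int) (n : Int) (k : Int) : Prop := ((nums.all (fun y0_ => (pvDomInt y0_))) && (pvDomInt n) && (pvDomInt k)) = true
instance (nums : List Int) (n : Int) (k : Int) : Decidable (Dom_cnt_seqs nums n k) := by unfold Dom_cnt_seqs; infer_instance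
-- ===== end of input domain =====

-- B replaces A's two-pointer sweep by an independent binary search per start index (alternative
-- decomposition, same sort cost). Both Pythons sort `nums` in place; the theorems are about the
-- return value (B performs the same mutation).

-- ===== PORT A =====
-- inner 'while r < n and nums[r] - nums[l] <= k: r += 1'; the Nat argument is fuel that only
-- makes the recursion total (callers pass (n - r).toNat, enough for every iteration Python runs)
def pvInnerR (s : List Int) (n k l : Int) : Nat → Int → Int
  | 0, r => r
  | fuel + 1, r =>
    if r < n ∧ PySem.List.pyGetD s r 0 - PySem.List.pyGetD s l 0 ≤ k then
      pvInnerR s n k l fuel (r + 1)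
    else r

-- inner 'while l < r and nums[l] + k < nums[r]: l += 1' (fuel: (r - l).toNat)
def pvInnerL (s : List Int) (k r : Int) : Nat → Int → Int
  | 0, l => l
  | fuel + 1, l =>
    if l < r ∧ PySem.List.pyGetD s l 0 + k < PySem.List.pyGetD s r 0 then
      pvInnerL s k r fuel (l + 1)
    else l

-- outer 'while r < n' loop; its fuel is exhausted only where the Python diverges
-- (0 < n and k < 0), which Pre_ excludes
def pvOuter (s : List Int) (n k : Int) (fuel : Nat) (days l r : Int) : Int :=
  if r < n then
    let r' := pvInnerR s n k l ((n - r).toNat) r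
    let days' := max days (r' - l)
    if r' = n then max days' (n - l)
    else
      match fuel with
      | 0 => days'
      | fuel' + 1 => pvOuter s n k fuel' days' (pvInnerL s k r' ((r' - l).toNat) l) r'
  else max days (n - l)

def cnt_seqs (nums : List Int) (n : Int) (k : Int) : Int :=
  pvOuter (PySem.List.sorted nums (fun x => x)) n k (n.toNat + 1) 0 0 0

-- ===== PORT B =====
-- hand-written bisect_right of nums[i]+k on [lo, hi) (the 'while lo < hi' loop of Source B;
-- fuel (hi - lo).toNat suffices since hi - lo shrinks every iteration)
def pvBis (s : List Int) (x : Int) : Nat → Int → Int → Int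
  | 0, lo, _ => lo
  | fuel + 1, lo, hi =>
    if lo < hi then
      let mid := PySem.Int.floordiv (lo + hi) 2
      if PySem.List.pyGetD s mid 0 ≤ x then pvBis s x fuel (mid + 1) hi
      else pvBis s x fuel lo mid
    else lo

def cnt_seqs_alt (nums : List Int) (n : Int) (k : Int) : Int :=
  let s := PySem.List.sorted nums (fun x => x)
  (PySem.List.pyRange 0 n 1).foldl
    (fun best i => max best (pvBis s (PySem.List.pyGetD s i 0 + k) ((n - i).toNat) i n - i)) 0

-- ===== PRECONDITION & SPEC =====
-- Pre_ excludes exactly the inputs where A does not return: n > len(nums) (IndexError) and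
-- 0 < n with k < 0 (the two-pointer sweep stalls and A loops forever).
def Pre_cnt_seqs (nums : List Int) (n : Int) (k : Int) : Prop :=
  n ≤ (nums.length : Int) ∧ (0 < n → 0 ≤ k)
instance (nums : List Int) (n : Int) (k : Int) : Decidable (Pre_cnt_seqs nums n k) := by
  unfold Pre_cnt_seqs; infer_instance

def pvWitness_cnt_seqs : List Int × Int × Int := ([3, 1, 4, 1, 5], 5, 2)

def Spec_cnt_seqs (nums : List Int) (n : Int) (k : Int) (out : Int) : Prop := out = cnt_seqs_alt nums n k
instance (nums : List Int) (n : Int) (k : Int) (out : Int) : Decidable (Spec_cnt_seqs nums n k out) := by unfold Spec_cnt_seqs; infer_instance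

-- ===== CLAIM (what is proved, stated in full; the proofs are below) =====
def Claim_equal_cnt_seqs : Prop := ∀ (nums : List Int) (n : Int) (k : Int), Dom_cnt_seqs nums n k → Pre_cnt_seqs nums n k → Spec_cnt_seqs nums n k (cnt_seqs nums n k)

-- ===== LEMMAS AND PROOFS =====

-- `nums[m]` shorthand used throughout the lemmas: PySem.List.pyGetD s m 0

theorem pv_mono {s : List Int} (hs : s.Pairwise (fun a b => a ≤ b)) {a b : Int}
    (h0 : 0 ≤ a) (hab : a ≤ b) (hb : b < (s.length : Int)) :
    PySem.List.pyGetD s a 0 ≤ PySem.List.pyGetD s b 0 := by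
  rcases eq_or_lt_of_le hab with rfl | hlt
  · exact le_refl _
  · rw [PySem.List.pyGetD_eq_getElem s 0 h0 (by omega),
      PySem.List.pyGetD_eq_getElem s 0 (by omega) hb]
    exact List.pairwise_iff_getElem.mp hs a.toNat b.toNat (by omega) (by omega) (by omega)

-- characterization of the hand-written bisect loop of B (for any sufficient fuel)
theorem pvBis_spec {s : List Int} (hs : s.Pairwise (fun a b => a ≤ b)) (x : Int) :
    ∀ (fuel : Nat) (lo hi : Int), (hi - lo).toNat ≤ fuel → 0 ≤ lo → lo ≤ hi →
    hi ≤ (s.length : Int) →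
    lo ≤ pvBis s x fuel lo hi ∧ pvBis s x fuel lo hi ≤ hi ∧
    (∀ m, lo ≤ m → m < pvBis s x fuel lo hi → PySem.List.pyGetD s m 0 ≤ x) ∧
    (∀ m, pvBis s x fuel lo hi ≤ m → m < hi → x < PySem.List.pyGetD s m 0) := by
  intro fuel
  induction fuel with
  | zero =>
    intro lo hi hT h0 hlh hhi
    simp only [pvBis]
    exact ⟨le_refl _, hlh, fun m h1 h2 => by omega, fun m h1 h2 => by omega⟩
  | succ fuel ih =>
    intro lo hi hT h0 hlh hhi
    by_cases hcase : lo < hi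
    · have hM : PySem.Int.floordiv (lo + hi) 2 = (lo + hi) / 2 := by
        simp only [PySem.Int.floordiv]
        exact Int.fdiv_eq_ediv_of_nonneg _ (by norm_num)
      set M := PySem.Int.floordiv (lo + hi) 2 with hMdef
      have hloM : lo ≤ M := by omega
      have hMhi : M < hi := by omega
      simp only [pvBis, if_pos hcase, ← hMdef]
      by_cases hle : PySem.List.pyGetD s M 0 ≤ x
      · simp only [if_pos hle]
        obtain ⟨i1, i2, i3, i4⟩ := ih (M + 1) hi (by omega) (by omega) (by omega) hhi
        refine ⟨by omega, i2, ?_, i4⟩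
        intro m h1 h2
        by_cases hm : M + 1 ≤ m
        · exact i3 m hm h2
        · exact le_trans (pv_mono hs (by omega) (by omega) (by omega)) hle
      · simp only [if_neg hle]
        obtain ⟨i1, i2, i3, i4⟩ := ih lo M (by omega) h0 (by omega) (by omega)
        refine ⟨i1, by omega, i3, ?_⟩
        intro m h1 h2
        by_cases hm : m < M
        · exact i4 m h1 hm
        · have h5 : x < PySem.List.pyGetD s M 0 := by omega
          exact lt_of_lt_of_le h5 (pv_mono hs (by omega) (by omega) (by omega))
    · simp only [pvBis, if_neg hcase]
      exact ⟨le_refl _, hlh, fun m h1 h2 => by omega, fun m h1 h2 => by omega⟩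

-- characterization of the r-advancing inner while loop of A (for any sufficient fuel)
theorem pvInnerR_spec (s : List Int) (n k l : Int) :
    ∀ (fuel : Nat) (r : Int), (n - r).toNat ≤ fuel → r ≤ n →
    r ≤ pvInnerR s n k l fuel r ∧ pvInnerR s n k l fuel r ≤ n ∧
    (∀ m, r ≤ m → m < pvInnerR s n k l fuel r →
      PySem.List.pyGetD s m 0 - PySem.List.pyGetD s l 0 ≤ k) ∧
    (pvInnerR s n k l fuel r = n ∨
      ¬(PySem.List.pyGetD s (pvInnerR s n k l fuel r) 0 - PySem.List.pyGetD s l 0 ≤ k)) := by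
  intro fuel
  induction fuel with
  | zero =>
    intro r hT hrn
    have hr : r = n := by omega
    simp only [pvInnerR]
    exact ⟨le_refl _, hrn, fun m h1 h2 => by omega, Or.inl hr⟩
  | succ fuel ih =>
    intro r hT hrn
    by_cases hc : r < n ∧ PySem.List.pyGetD s r 0 - PySem.List.pyGetD s l 0 ≤ k
    · simp only [pvInnerR, if_pos hc]
      obtain ⟨i1, i2, i3, i4⟩ := ih (r + 1) (by omega) (by omega)
      refine ⟨by omega, i2, ?_, i4⟩
      intro m h1 h2
      rcases eq_or_lt_of_le h1 with rfl | hlt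
      · exact hc.2
      · exact i3 m (by omega) h2
    · simp only [pvInnerR, if_neg hc]
      refine ⟨le_refl _, hrn, fun m h1 h2 => by omega, ?_⟩
      rcases eq_or_lt_of_le hrn with rfl | hlt
      · exact Or.inl rfl
      · exact Or.inr (fun hk2 => hc ⟨hlt, hk2⟩)

-- characterization of the l-advancing inner while loop of A (for any sufficient fuel)
theorem pvInnerL_spec (s : List Int) (k r : Int) :
    ∀ (fuel : Nat) (l : Int), (r - l).toNat ≤ fuel → l ≤ r →
    l ≤ pvInnerL s k r fuel l ∧ pvInnerL s k r fuel l ≤ r ∧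
    (∀ m, l ≤ m → m < pvInnerL s k r fuel l →
      PySem.List.pyGetD s m 0 + k < PySem.List.pyGetD s r 0) ∧
    (pvInnerL s k r fuel l = r ∨
      ¬(PySem.List.pyGetD s (pvInnerL s k r fuel l) 0 + k < PySem.List.pyGetD s r 0)) := by
  intro fuel
  induction fuel with
  | zero =>
    intro l hT hlr
    have hl : l = r := by omega
    simp only [pvInnerL]
    exact ⟨le_refl _, hlr, fun m h1 h2 => by omega, Or.inl hl⟩
  | succ fuel ih =>
    intro l hT hlr
    by_cases hc : l < r ∧ PySem.List.pyGetD s l 0 + k < PySem.List.pyGetD s r 0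
    · simp only [pvInnerL, if_pos hc]
      obtain ⟨i1, i2, i3, i4⟩ := ih (l + 1) (by omega) (by omega)
      refine ⟨by omega, i2, ?_, i4⟩
      intro m h1 h2
      rcases eq_or_lt_of_le h1 with rfl | hlt
      · exact hc.2
      · exact i3 m (by omega) h2
    · simp only [pvInnerL, if_neg hc]
      refine ⟨le_refl _, hlr, fun m h1 h2 => by omega, ?_⟩
      rcases eq_or_lt_of_le hlr with rfl | hlt
      · exact Or.inl rfl
      · exact Or.inr (fun hk2 => hc ⟨hlt, hk2⟩)

-- under the sweep invariant, A's inner r-loop lands exactly on B's bisect boundary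
theorem pvInnerR_eq_pvBis {s : List Int} (hs : s.Pairwise (fun a b => a ≤ b))
    {n k l r : Int} {f1 f2 : Nat}
    (hf1 : (n - r).toNat ≤ f1) (hf2 : (n - l).toNat ≤ f2)
    (h0 : 0 ≤ l) (hlr : l ≤ r) (hrn : r ≤ n) (hn : n ≤ (s.length : Int))
    (hpre : ∀ m, l ≤ m → m < r → PySem.List.pyGetD s m 0 ≤ PySem.List.pyGetD s l 0 + k) :
    pvInnerR s n k l f1 r = pvBis s (PySem.List.pyGetD s l 0 + k) f2 l n := by
  obtain ⟨a1, a2, a3, a4⟩ := pvInnerR_spec s n k l f1 r hf1 hrn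
  obtain ⟨b1, b2, b3, b4⟩ := pvBis_spec hs (PySem.List.pyGetD s l 0 + k) f2 l n hf2 h0
    (le_trans hlr hrn) hn
  set j1 := pvInnerR s n k l f1 r with hj1
  set j2 := pvBis s (PySem.List.pyGetD s l 0 + k) f2 l n with hj2
  rcases lt_trichotomy j1 j2 with hlt | heq | hgt
  · have hx : PySem.List.pyGetD s j1 0 ≤ PySem.List.pyGetD s l 0 + k :=
      b3 j1 (by omega) hlt
    rcases a4 with he | hb
    · omega
    · omega
  · exact heq
  · have hx : PySem.List.pyGetD s l 0 + k < PySem.List.pyGetD s j2 0 :=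
      b4 j2 (le_refl _) (by omega)
    by_cases hm : r ≤ j2
    · have := a3 j2 hm hgt; omega
    · have := hpre j2 b1 (by omega); omega

-- B's running maximum over start indices [a, b)
def pvFold (s : List Int) (n k a b acc : Int) : Int :=
  (PySem.List.pyRange a b 1).foldl
    (fun best i => max best (pvBis s (PySem.List.pyGetD s i 0 + k) ((n - i).toNat) i n - i)) acc

theorem pvFold_nil (s : List Int) (n k a b acc : Int) (h : b ≤ a) :
    pvFold s n k a b acc = acc := by
  unfold pvFold; rw [PySem.List.pyRange_one_eq_nil h]; rfl

theorem pvFold_succ_right (s : List Int) (n k a b acc : Int) (h : a ≤ b) :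
    pvFold s n k a (b + 1) acc =
      max (pvFold s n k a b acc)
        (pvBis s (PySem.List.pyGetD s b 0 + k) ((n - b).toNat) b n - b) := by
  unfold pvFold; rw [PySem.List.pyRange_one_succ_right h, List.foldl_append]; rfl

theorem pvFold_const (s : List Int) (n k : Int) :
    ∀ a b acc : Int,
    (∀ i, a ≤ i → i < b →
      pvBis s (PySem.List.pyGetD s i 0 + k) ((n - i).toNat) i n - i ≤ acc) →
    pvFold s n k a b acc = acc := by
  intro a b acc h
  have main : ∀ (T : Nat) (a acc : Int), (b - a).toNat ≤ T →
      (∀ i, a ≤ i → i < b →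
        pvBis s (PySem.List.pyGetD s i 0 + k) ((n - i).toNat) i n - i ≤ acc) →
      pvFold s n k a b acc = acc := by
    intro T
    induction T with
    | zero =>
      intro a acc hT _
      exact pvFold_nil s n k a b acc (by omega)
    | succ T ih =>
      intro a acc hT hbound
      by_cases hab : a < b
      · rw [pvFold, PySem.List.pyRange_one_cons hab, List.foldl_cons]
        rw [max_eq_left (hbound a (le_refl _) hab)]
        exact ih (a + 1) acc (by omega) (fun i h1 h2 => hbound i (by omega) h2)
      · exact pvFold_nil s n k a b acc (by omega)
  exact main (b - a).toNat a acc (le_refl _) h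

theorem pvFold_split (s : List Int) (n k a m b acc : Int) (h1 : a ≤ m) (h2 : m ≤ b) :
    pvFold s n k a b acc = pvFold s n k m b (pvFold s n k a m acc) := by
  unfold pvFold; rw [PySem.List.pyRange_one_append a m b h1 h2, List.foldl_append]

theorem pvFold_init_le (s : List Int) (n k a b acc : Int) : acc ≤ pvFold s n k a b acc :=
  (PySem.List.le_foldl_max_int _ _ _).1

-- the outer-loop invariant: A's sweep state always evaluates to B's full maximum
theorem pvOuter_eq {s : List Int} (hs : s.Pairwise (fun a b => a ≤ b)) {n k : Int}
    (hn : n ≤ (s.length : Int)) (hk : 0 ≤ k) :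
    ∀ (fuel : Nat) (days l r : Int), 0 ≤ l → l ≤ r → r ≤ n →
    (∀ m, l ≤ m → m < r → PySem.List.pyGetD s m 0 ≤ PySem.List.pyGetD s l 0 + k) →
    (r < n → PySem.List.pyGetD s r 0 ≤ PySem.List.pyGetD s l 0 + k) →
    days = pvFold s n k 0 l 0 →
    (n - r).toNat < fuel →
    pvOuter s n k fuel days l r = pvFold s n k 0 n 0 := by
  intro fuel
  induction fuel with
  | zero => intro days l r _ _ _ _ _ _ hfuel; omega
  | succ fuel ih =>
    intro days l r h0 hlr hrn hinv hedge hdays hfuel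
    have hstep : pvOuter s n k (fuel + 1) days l r =
        (if r < n then
          let r' := pvInnerR s n k l ((n - r).toNat) r
          let days' := max days (r' - l)
          if r' = n then max days' (n - l)
          else pvOuter s n k fuel days' (pvInnerL s k r' ((r' - l).toNat) l) r'
        else max days (n - l)) := rfl
    rw [hstep]
    by_cases hr : r < n
    · simp only [if_pos hr]
      have heq : pvInnerR s n k l ((n - r).toNat) r =
          pvBis s (PySem.List.pyGetD s l 0 + k) ((n - l).toNat) l n :=
        pvInnerR_eq_pvBis hs (le_refl _) (le_refl _) h0 hlr hrn hn
          (fun m h1 h2 => by have := hinv m h1 h2; omega)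
      obtain ⟨b1, b2, b3, b4⟩ := pvBis_spec hs (PySem.List.pyGetD s l 0 + k)
        ((n - l).toNat) l n (le_refl _) h0 (by omega) hn
      set r' := pvInnerR s n k l ((n - r).toNat) r with hr'def
      have hrr' : r < r' := by
        by_contra hcon
        have h1 : r' ≤ r := by omega
        have := b4 r (by omega) hr
        have := hedge hr
        omega
      have hdays' : max days (r' - l) = pvFold s n k 0 (l + 1) 0 := by
        rw [pvFold_succ_right s n k 0 l 0 h0, ← hdays, heq]
      by_cases hrn' : r' = n
      · simp only [if_pos hrn']
        have key : pvFold s n k 0 n 0 = max days (r' - l) := by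
          rw [pvFold_split s n k 0 (l + 1) n 0 (by omega) (by omega), ← hdays']
          apply pvFold_const
          intro i h1 h2
          obtain ⟨c1, c2, _, _⟩ := pvBis_spec hs (PySem.List.pyGetD s i 0 + k)
            ((n - i).toNat) i n (le_refl _) (by omega) (by omega) hn
          omega
        rw [key]
        omega
      · simp only [if_neg hrn']
        have hr'n : r' < n := by omega
        have hlr' : l ≤ r' := by omega
        obtain ⟨d1, d2, d3, d4⟩ := pvInnerL_spec s k r' ((r' - l).toNat) l (le_refl _) hlr'
        set l' := pvInnerL s k r' ((r' - l).toNat) l with hl'def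
        have hlx : PySem.List.pyGetD s l 0 + k < PySem.List.pyGetD s r' 0 :=
          b4 r' (by omega) hr'n
        have hll' : l < l' := by
          rcases d4 with he | hb
          · omega
          · by_contra hcon
            have : l' = l := by omega
            rw [this] at hb
            exact hb hlx
        have hinv' : ∀ m, l' ≤ m → m < r' →
            PySem.List.pyGetD s m 0 ≤ PySem.List.pyGetD s l' 0 + k := by
          intro m h1 h2
          have hm1 : PySem.List.pyGetD s m 0 ≤ PySem.List.pyGetD s r' 0 :=
            pv_mono hs (by omega) (by omega) (by omega)
          rcases d4 with he | hb
          · omega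
          · omega
        have hedge' : r' < n → PySem.List.pyGetD s r' 0 ≤ PySem.List.pyGetD s l' 0 + k := by
          intro _
          rcases d4 with he | hb
          · rw [he]; omega
          · omega
        have hdays'' : max days (r' - l) = pvFold s n k 0 l' 0 := by
          rw [hdays', pvFold_split s n k 0 (l + 1) l' 0 (by omega) (by omega), ← hdays']
          symm
          apply pvFold_const
          intro i h1 h2
          obtain ⟨c1, c2, c3, c4⟩ := pvBis_spec hs (PySem.List.pyGetD s i 0 + k)
            ((n - i).toNat) i n (le_refl _) (by omega) (by omega) hn
          have hik : PySem.List.pyGetD s i 0 + k < PySem.List.pyGetD s r' 0 :=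
            d3 i (by omega) h2
          have hjr : pvBis s (PySem.List.pyGetD s i 0 + k) ((n - i).toNat) i n ≤ r' := by
            by_contra hcon
            have := c3 r' (by omega) (by omega)
            omega
          omega
        exact ih (max days (r' - l)) l' r' (by omega) (by omega) (by omega)
          hinv' hedge' hdays'' (by omega)
    · simp only [if_neg hr]
      have hreq : r = n := by omega
      by_cases hl : l < n
      · obtain ⟨c1, c2, c3, c4⟩ := pvBis_spec hs (PySem.List.pyGetD s l 0 + k)
          ((n - l).toNat) l n (le_refl _) h0 (by omega) hn
        have hbl : pvBis s (PySem.List.pyGetD s l 0 + k) ((n - l).toNat) l n = n := by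
          by_contra hcon
          have h2 : pvBis s (PySem.List.pyGetD s l 0 + k) ((n - l).toNat) l n < n := by omega
          have h3 := c4 _ (le_refl _) h2
          have h4 := hinv _ c1 (by omega)
          omega
        have key : pvFold s n k 0 n 0 = max days (n - l) := by
          rw [pvFold_split s n k 0 l n 0 (by omega) (by omega), ← hdays]
          rw [pvFold, PySem.List.pyRange_one_cons hl, List.foldl_cons]
          have hfl : pvBis s (PySem.List.pyGetD s l 0 + k) ((n - l).toNat) l n - l = n - l := by
            omega
          rw [hfl]
          show pvFold s n k (l + 1) n (max days (n - l)) = max days (n - l)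
          apply pvFold_const
          intro i h1 h2
          obtain ⟨e1, e2, _, _⟩ := pvBis_spec hs (PySem.List.pyGetD s i 0 + k)
            ((n - i).toNat) i n (le_refl _) (by omega) (by omega) hn
          omega
        rw [key]
      · have hleq : l = n := by omega
        have hge : (0 : Int) ≤ days := by
          rw [hdays]
          exact pvFold_init_le s n k 0 l 0
        have key : pvFold s n k 0 n 0 = days := by
          rw [hdays, hleq]
        rw [key]
        omega

-- ===== VERDICT (by name: the statement is the Claim_ definition above) =====
theorem cnt_seqs_spec : Claim_equal_cnt_seqs := by
  intro nums n k _hdom hpre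
  obtain ⟨hn, hk⟩ := hpre
  unfold Spec_cnt_seqs cnt_seqs cnt_seqs_alt
  set s := PySem.List.sorted nums (fun x => x) with hsdef
  have hlen : (s.length : Int) = (nums.length : Int) := by
    rw [hsdef, PySem.List.length_sorted]
  have hs : s.Pairwise (fun a b => a ≤ b) := PySem.List.sorted_pairwise nums (fun x => x)
  by_cases hn0 : 0 < n
  · have := pvOuter_eq hs (show n ≤ (s.length : Int) by omega) (hk hn0) (n.toNat + 1) 0 0 0
      (le_refl 0) (le_refl 0) (by omega)
      (by intro m h1 h2; omega)
      (by intro _; simpa using hk hn0)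
      (by rw [pvFold_nil s n k 0 0 0 (le_refl 0)])
      (by omega)
    simpa [pvFold] using this
  · have h1 : pvOuter s n k (n.toNat + 1) 0 0 0 = 0 := by
      unfold pvOuter
      simp only [if_neg hn0]
      omega
    rw [h1, PySem.List.pyRange_one_eq_nil (by omega)]
    rfl
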